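-- pv_equiv track=rewrite | github.com/jameshung2015/vita-model-researcher | scripts/governance/validate_ownership.py | verify_minimal_ownership
-- ===== SOURCE A (Python) =====
-- from typing import Dict, List
--
-- def minimal_globs() -> List[str]:
--     return [
--         'models/*.json',
--         'indicators/*.json',
--         'benchmarks/*.json'
--     ]
--
-- def verify_minimal_ownership(owners: List[dict]) -> List[str]:
--     errs: List[str] = []
--     patterns = minimal_globs()
--     # pattern -> bool has_owner
--     has_owner = {p: False for p in patterns}
--     for o in owners:
--         globs_o = set(o.get('paths') or [])
--         for p in patterns:
--             # simple glob equality
--             if p in globs_o: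
--                 has_owner[p] = True
--     for p, ok in has_owner.items():
--         if not ok:
--             errs.append(f"OWNERS: no owner declares path '{p}'")
--     return errs
-- ===== SOURCE B (Python) =====
-- from typing import List
--
-- def minimal_globs() -> List[str]:
--     return [
--         'models/*.json',
--         'indicators/*.json',
--         'benchmarks/*.json'
--     ]
--
-- def verify_minimal_ownership(owners: List[dict]) -> List[str]:
--     # Inverted nesting: for each required pattern, search the owners for one
--     # that declares it (short-circuits); no flag dict, no aggregated set.
--     def declared(p: str) -> bool:
--         return any(p in (o.get('paths') or []) for o in owners)
--     return [f"OWNERS: no owner declares path '{p}'"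
--             for p in minimal_globs() if not declared(p)]
-- ===== Notes on version B (the rewrite author's own statement) =====
-- stated objective: simpler
-- what changed: Inverts the loop nesting: instead of one pass over owners updating a mutable pattern->bool flag dict, B runs a short-circuiting existential search over owners per required pattern and filters the patterns in one comprehension, with no intermediate mutable state.
import Mathlib
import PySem

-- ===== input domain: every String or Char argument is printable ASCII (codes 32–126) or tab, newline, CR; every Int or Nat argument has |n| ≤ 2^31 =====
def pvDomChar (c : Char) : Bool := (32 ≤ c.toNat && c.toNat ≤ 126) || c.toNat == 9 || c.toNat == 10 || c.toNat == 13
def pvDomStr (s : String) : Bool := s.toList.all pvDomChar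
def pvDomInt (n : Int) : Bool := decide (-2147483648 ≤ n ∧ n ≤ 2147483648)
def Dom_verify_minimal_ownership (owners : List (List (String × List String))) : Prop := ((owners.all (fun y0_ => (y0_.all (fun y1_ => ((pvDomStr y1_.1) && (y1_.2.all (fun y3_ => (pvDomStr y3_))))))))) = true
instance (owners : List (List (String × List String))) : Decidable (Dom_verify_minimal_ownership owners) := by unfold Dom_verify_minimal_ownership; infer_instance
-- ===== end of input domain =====

-- B inverts the loop nesting: a short-circuit existential search over owners per required
-- pattern plus one filter, instead of A's owners-pass updating a mutable flag dict (objective: simpler).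

-- shared module helper (verbatim from the Python module)
def minimal_globs : List String :=
  ["models/*.json", "indicators/*.json", "benchmarks/*.json"]

-- ===== PORT A =====
def verify_minimal_ownership (owners : List (List (String × List String))) : List String :=
  let patterns := minimal_globs
  -- has_owner = {p: False for p in patterns}
  let has_owner : PySem.Dict String Bool :=
    patterns.foldl (fun d p => d.insert p false) PySem.Dict.empty
  -- for o in owners: globs_o = set(o.get('paths') or []); for p in patterns: if p in globs_o: has_owner[p] = True
  let has_owner := owners.foldl (fun d o =>
      let globs_o := PySem.Set.ofList (((PySem.Dict.mk o).get? "paths").getD [])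
      patterns.foldl (fun d p => if PySem.Set.contains globs_o p then d.insert p true else d) d)
    has_owner
  -- for p, ok in has_owner.items(): if not ok: errs.append(...)
  has_owner.items.foldl (fun errs pk =>
      if pk.2 = false then errs ++ ["OWNERS: no owner declares path '" ++ pk.1 ++ "'"] else errs)
    []

-- ===== PORT B =====
-- declared(p) = any(p in (o.get('paths') or []) for o in owners)   (short-circuit existential search)
def pvDeclared (owners : List (List (String × List String))) (p : String) : Bool :=
  owners.any (fun o => (((PySem.Dict.mk o).get? "paths").getD []).contains p)

def verify_minimal_ownership_alt (owners : List (List (String × List String))) : List String :=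
  -- [msg for p in minimal_globs() if not declared(p)]
  (minimal_globs.filter (fun p => !(pvDeclared owners p))).map
    (fun p => "OWNERS: no owner declares path '" ++ p ++ "'")

-- ===== PRECONDITION & SPEC =====
def Spec_verify_minimal_ownership (owners : List (List (String × List String))) (out : List String) : Prop := out = verify_minimal_ownership_alt owners
instance (owners : List (List (String × List String))) (out : List String) : Decidable (Spec_verify_minimal_ownership owners out) := by unfold Spec_verify_minimal_ownership; infer_instance

-- ===== CLAIM (what is proved, stated in full; the proofs are below) =====
def Claim_equal_verify_minimal_ownership : Prop := ∀ (owners : List (List (String × List String))), Dom_verify_minimal_ownership owners → Spec_verify_minimal_ownership owners (verify_minimal_ownership owners)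

-- ===== LEMMAS AND PROOFS =====

lemma pv_contains_ofList (l : List String) (p : String) :
    PySem.Set.contains (PySem.Set.ofList l) p = l.contains p := by
  rw [Bool.eq_iff_iff]
  simp [PySem.Set.mem_ofList]

lemma pv_stepA (globs : List String) (b1 b2 b3 : Bool) :
    minimal_globs.foldl (fun d p => if PySem.Set.contains (PySem.Set.ofList globs) p then d.insert p true else d)
      (PySem.Dict.mk [("models/*.json", b1), ("indicators/*.json", b2), ("benchmarks/*.json", b3)])
    = PySem.Dict.mk [("models/*.json", b1 || globs.contains "models/*.json"),
        ("indicators/*.json", b2 || globs.contains "indicators/*.json"),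
        ("benchmarks/*.json", b3 || globs.contains "benchmarks/*.json")] := by
  simp only [pv_contains_ofList]
  by_cases h1 : ("models/*.json" : String) ∈ globs <;>
  by_cases h2 : ("indicators/*.json" : String) ∈ globs <;>
  by_cases h3 : ("benchmarks/*.json" : String) ∈ globs <;>
  cases b1 <;> cases b2 <;> cases b3 <;>
    simp [minimal_globs, List.foldl, h1, h2, h3, PySem.Dict.insert]

lemma pv_loopA (owners : List (List (String × List String))) (b1 b2 b3 : Bool) :
    owners.foldl (fun d o =>
        let globs_o := PySem.Set.ofList (((PySem.Dict.mk o).get? "paths").getD [])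
        minimal_globs.foldl (fun d p => if PySem.Set.contains globs_o p then d.insert p true else d) d)
      (PySem.Dict.mk [("models/*.json", b1), ("indicators/*.json", b2), ("benchmarks/*.json", b3)])
    = PySem.Dict.mk [("models/*.json", b1 || pvDeclared owners "models/*.json"),
        ("indicators/*.json", b2 || pvDeclared owners "indicators/*.json"),
        ("benchmarks/*.json", b3 || pvDeclared owners "benchmarks/*.json")] := by
  induction owners generalizing b1 b2 b3 with
  | nil => simp [pvDeclared]
  | cons o os ih =>
      simp only [List.foldl_cons, pv_stepA, ih, pvDeclared, List.any_cons, Bool.or_assoc]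

-- ===== VERDICT (by name: the statement is the Claim_ definition above) =====
theorem verify_minimal_ownership_spec : Claim_equal_verify_minimal_ownership := by
  intro owners _
  unfold Spec_verify_minimal_ownership
  have hinit : minimal_globs.foldl (fun d p => d.insert p false) PySem.Dict.empty
      = PySem.Dict.mk [("models/*.json", false), ("indicators/*.json", false), ("benchmarks/*.json", false)] := by
    decide
  have hA : verify_minimal_ownership owners
      = ((owners.foldl (fun d o =>
            let globs_o := PySem.Set.ofList (((PySem.Dict.mk o).get? "paths").getD [])
            minimal_globs.foldl (fun d p => if PySem.Set.contains globs_o p then d.insert p true else d) d)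
          (minimal_globs.foldl (fun d p => d.insert p false) PySem.Dict.empty)).items).foldl
          (fun errs pk => if pk.2 = false then errs ++ ["OWNERS: no owner declares path \'" ++ pk.1 ++ "\'"] else errs) [] := rfl
  rw [hA, hinit, pv_loopA]
  cases h1 : pvDeclared owners "models/*.json" <;>
  cases h2 : pvDeclared owners "indicators/*.json" <;>
  cases h3 : pvDeclared owners "benchmarks/*.json" <;>
    simp [verify_minimal_ownership_alt, minimal_globs, h1, h2, h3]
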